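-- pv_equiv track=rewrite | github.com/lorelupo/divide-and-rule | scripts/split_corpus_sentences.py | embedded_corefs
-- ===== SOURCE A (Python) =====
-- def embedded_corefs(corefs):
--     embed = False
--     res = None
--     for t in corefs:
--         if (t[0] <= t[2] and t[1] > t[3]) or (t[0] < t[2] and t[1] >= t[3]):
--             embed = True
--         elif (t[2] <= t[0] and t[3] > t[1]) or (t[2] < t[0] and t[3] >= t[1]):
--             embed = True
--         else:
--             res = t
--     return embed, res
-- ===== SOURCE B (Python) =====
-- def is_embedded(t):
--     return ((t[0] <= t[2] and t[1] > t[3]) or (t[0] < t[2] and t[1] >= t[3])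
--             or (t[2] <= t[0] and t[3] > t[1]) or (t[2] < t[0] and t[3] >= t[1]))
--
--
-- def embedded_corefs(corefs):
--     embed = any(is_embedded(t) for t in corefs)
--     res = next((t for t in reversed(corefs) if not is_embedded(t)), None)
--     return embed, res
-- ===== Notes on version B (the rewrite author's own statement) =====
-- stated objective: simpler
-- what changed: Extracts the containment test into a predicate and replaces the fused state-carrying loop by two declarative passes: a short-circuiting any() for the flag and a backward early-exit search (next over reversed) for the last non-embedded tuple.
import Mathlib
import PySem

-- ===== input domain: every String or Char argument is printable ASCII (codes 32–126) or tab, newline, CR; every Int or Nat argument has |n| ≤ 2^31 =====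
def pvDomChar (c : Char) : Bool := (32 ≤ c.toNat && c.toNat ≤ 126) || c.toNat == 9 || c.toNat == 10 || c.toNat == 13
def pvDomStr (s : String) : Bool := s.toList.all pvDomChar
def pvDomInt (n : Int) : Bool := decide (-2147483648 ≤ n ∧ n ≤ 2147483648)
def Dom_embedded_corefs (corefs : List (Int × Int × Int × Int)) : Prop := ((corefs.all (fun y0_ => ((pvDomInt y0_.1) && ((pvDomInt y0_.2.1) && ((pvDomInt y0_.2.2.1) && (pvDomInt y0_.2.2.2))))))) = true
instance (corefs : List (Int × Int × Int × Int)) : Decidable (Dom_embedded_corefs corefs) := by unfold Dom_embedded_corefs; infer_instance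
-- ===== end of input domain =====

-- ===== PORT A =====
-- literal port of A: one forward fold carrying (embed, res)
def embedded_corefs (corefs : List (Int × Int × Int × Int)) : Bool × (Option (Int × Int × Int × Int)) :=
  corefs.foldl (fun s t =>
    if (t.1 ≤ t.2.2.1 ∧ t.2.1 > t.2.2.2) ∨ (t.1 < t.2.2.1 ∧ t.2.1 ≥ t.2.2.2) then
      (true, s.2)
    else if (t.2.2.1 ≤ t.1 ∧ t.2.2.2 > t.2.1) ∨ (t.2.2.1 < t.1 ∧ t.2.2.2 ≥ t.2.1) then
      (true, s.2)
    else
      (s.1, some t)) (false, none)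

-- ===== PORT B =====
-- B: a predicate, a short-circuiting any, and a backward early-exit search
def isEmbeddedB (t : Int × Int × Int × Int) : Bool :=
  decide ((t.1 ≤ t.2.2.1 ∧ t.2.1 > t.2.2.2) ∨ (t.1 < t.2.2.1 ∧ t.2.1 ≥ t.2.2.2)
    ∨ (t.2.2.1 ≤ t.1 ∧ t.2.2.2 > t.2.1) ∨ (t.2.2.1 < t.1 ∧ t.2.2.2 ≥ t.2.1))

def embedded_corefs_alt (corefs : List (Int × Int × Int × Int)) : Bool × (Option (Int × Int × Int × Int)) :=
  (corefs.any isEmbeddedB, corefs.reverse.find? (fun t => !isEmbeddedB t))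

-- ===== PRECONDITION & SPEC =====
def Spec_embedded_corefs (corefs : List (Int × Int × Int × Int)) (out : Bool × (Option (Int × Int × Int × Int))) : Prop := out = embedded_corefs_alt corefs
instance (corefs : List (Int × Int × Int × Int)) (out : Bool × (Option (Int × Int × Int × Int))) : Decidable (Spec_embedded_corefs corefs out) := by unfold Spec_embedded_corefs; infer_instance

-- ===== CLAIM (what is proved, stated in full; the proofs are below) =====
def Claim_equal_embedded_corefs : Prop := ∀ (corefs : List (Int × Int × Int × Int)), Dom_embedded_corefs corefs → Spec_embedded_corefs corefs (embedded_corefs corefs)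

-- ===== LEMMAS AND PROOFS =====

-- ===== VERDICT (by name: the statement is the Claim_ definition above) =====
-- invariant of A's fold, for any starting state
theorem embedded_corefs_fold (l : List (Int × Int × Int × Int)) (e : Bool)
    (r : Option (Int × Int × Int × Int)) :
    l.foldl (fun s t =>
      if (t.1 ≤ t.2.2.1 ∧ t.2.1 > t.2.2.2) ∨ (t.1 < t.2.2.1 ∧ t.2.1 ≥ t.2.2.2) then
        (true, s.2)
      else if (t.2.2.1 ≤ t.1 ∧ t.2.2.2 > t.2.1) ∨ (t.2.2.1 < t.1 ∧ t.2.2.2 ≥ t.2.1) then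
        (true, s.2)
      else
        (s.1, some t)) (e, r)
    = (e || l.any isEmbeddedB,
       ((l.reverse.find? (fun t => !isEmbeddedB t)).map some).getD r) := by
  induction l generalizing e r with
  | nil => simp
  | cons a l ih =>
      simp only [List.foldl_cons, List.any_cons, List.reverse_cons, List.find?_append]
      by_cases h : isEmbeddedB a
      · have hc : ((a.1 ≤ a.2.2.1 ∧ a.2.1 > a.2.2.2) ∨ (a.1 < a.2.2.1 ∧ a.2.1 ≥ a.2.2.2))
            ∨ ((a.2.2.1 ≤ a.1 ∧ a.2.2.2 > a.2.1) ∨ (a.2.2.1 < a.1 ∧ a.2.2.2 ≥ a.2.1)) := by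
          have := of_decide_eq_true h
          simp only [isEmbeddedB] at h
          tauto
        rcases hc with hc | hc
        · rw [if_pos hc, ih]
          simp [h, List.find?]
        · by_cases hc1 : (a.1 ≤ a.2.2.1 ∧ a.2.1 > a.2.2.2) ∨ (a.1 < a.2.2.1 ∧ a.2.1 ≥ a.2.2.2)
          · rw [if_pos hc1, ih]
            simp [h, List.find?]
          · rw [if_neg hc1, if_pos hc, ih]
            simp [h, List.find?]
      · have hn : ¬ ((a.1 ≤ a.2.2.1 ∧ a.2.1 > a.2.2.2) ∨ (a.1 < a.2.2.1 ∧ a.2.1 ≥ a.2.2.2)) ∧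
            ¬ ((a.2.2.1 ≤ a.1 ∧ a.2.2.2 > a.2.1) ∨ (a.2.2.1 < a.1 ∧ a.2.2.2 ≥ a.2.1)) := by
          simp only [isEmbeddedB, decide_eq_true_eq] at h
          tauto
        rw [if_neg hn.1, if_neg hn.2, ih]
        simp [h, List.find?]

theorem embedded_corefs_spec : Claim_equal_embedded_corefs := by
  intro corefs _
  unfold Spec_embedded_corefs embedded_corefs embedded_corefs_alt
  rw [embedded_corefs_fold]
  simp
  cases corefs.reverse.find? (fun t => !isEmbeddedB t) <;> simp
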